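-- pv_equiv track=rewrite | github.com/LinklyLuck/DataSearchAndCleanTool | er_providers/base.py | pick_entity_field
-- ===== SOURCE A (Python) =====
-- from typing import List, Dict, Optional, Any
--
-- def pick_entity_field(row: Dict[str, Any]) -> Optional[str]:
--     """
--     在一行数据里挑一个“像实体名”的字段；按常见优先级选取。
--     """
--     candidates = [
--         "movie_title", "title", "name", "entity_name", "product_name",
--         "ticker", "director_name", "company", "brand"
--     ]
--     for k in candidates:
--         if k in row and isinstance(row[k], str) and row[k].strip():
--             return k
--     # 兜底：第一个字符串列
--     for k, v in row.items():
--         if isinstance(v, str) and v.strip():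
--             return k
--     return None
-- ===== SOURCE B (Python) =====
-- def pick_entity_field(row):
--     """Single min-selection pass over the row: each valid string field gets a priority
--     rank (candidate index, or len(candidates)+position for the rest) and the key with
--     the smallest rank wins."""
--     candidates = [
--         "movie_title", "title", "name", "entity_name", "product_name",
--         "ticker", "director_name", "company", "brand"
--     ]
--     rank = {k: i for i, k in enumerate(candidates)}
--     base = len(candidates)
--     best = None
--     for pos, (k, v) in enumerate(row.items()):
--         if isinstance(v, str) and v.strip():
--             r = rank.get(k, base + pos)
--             if best is None or r < best[0]:
--                 best = (r, k)
--     return None if best is None else best[1]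
-- ===== Notes on version B (the rewrite author's own statement) =====
-- stated objective: alternative
-- what changed: A's two staged scans (priority candidate list, then fallback over the row) become a single min-selection pass over the row: each valid string field gets a numeric priority rank from a precomputed candidate-index dict (or len(candidates)+position for non-candidates) and the key of minimal rank is returned.
import Mathlib
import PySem

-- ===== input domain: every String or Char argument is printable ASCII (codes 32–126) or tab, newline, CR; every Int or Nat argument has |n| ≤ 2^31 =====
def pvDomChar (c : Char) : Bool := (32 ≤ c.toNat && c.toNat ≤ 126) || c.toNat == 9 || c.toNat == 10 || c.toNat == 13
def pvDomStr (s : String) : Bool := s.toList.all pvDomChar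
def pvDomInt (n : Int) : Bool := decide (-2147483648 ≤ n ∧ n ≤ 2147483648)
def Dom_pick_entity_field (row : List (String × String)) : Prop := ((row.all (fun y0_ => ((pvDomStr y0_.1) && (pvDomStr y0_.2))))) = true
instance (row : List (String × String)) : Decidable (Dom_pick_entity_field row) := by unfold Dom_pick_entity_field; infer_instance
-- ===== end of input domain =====

-- B replaces A's two staged scans by a single min-selection pass over the row, each valid
-- field carrying a priority rank from a precomputed dict (alternative decomposition, same cost).

-- ===== PORT A =====
-- A's candidate priority list
def pickA_candidates : List String :=
  ["movie_title", "title", "name", "entity_name", "product_name",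
   "ticker", "director_name", "company", "brand"]

-- fallback loop: 'for k, v in row.items(): if v.strip(): return k' (values are str, isinstance holds)
def pickA_fallback : List (String × String) → Option String
  | [] => none
  | (k, v) :: rest => if PySem.Str.strip v != "" then some k else pickA_fallback rest

-- candidate loop: 'for k in candidates: if k in row and row[k].strip(): return k'
-- ('k in row' + 'row[k]' = first-match lookup on the association list)
def pickA_loop (row : List (String × String)) : List String → Option String
  | [] => pickA_fallback row
  | k :: rest =>
    match row.find? (fun p => p.1 == k) with
    | some p => if PySem.Str.strip p.2 != "" then some k else pickA_loop row rest
    | none => pickA_loop row rest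

def pick_entity_field (row : List (String × String)) : Option String :=
  pickA_loop row pickA_candidates

-- ===== PORT B =====
def pickB_candidates : List String :=
  ["movie_title", "title", "name", "entity_name", "product_name",
   "ticker", "director_name", "company", "brand"]

-- rank = {k: i for i, k in enumerate(candidates)}
def pickB_rank : PySem.Dict String Int :=
  (PySem.List.enumerate pickB_candidates).foldl (fun d ik => d.insert ik.2 ik.1) PySem.Dict.empty

-- loop body: 'if isinstance(v, str) and v.strip(): r = rank.get(k, base + pos);
--             if best is None or r < best[0]: best = (r, k)'
def pickB_step (best : Option (Int × String)) (p : Int × (String × String)) : Option (Int × String) :=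
  if PySem.Str.strip p.2.2 != "" then
    let r := pickB_rank.getD p.2.1 ((pickB_candidates.length : Int) + p.1)
    match best with
    | none => some (r, p.2.1)
    | some b => if r < b.1 then some (r, p.2.1) else best
  else best

-- 'for pos, (k, v) in enumerate(row.items()): …; return None if best is None else best[1]'
def pick_entity_field_alt (row : List (String × String)) : Option String :=
  match (PySem.List.enumerate row).foldl pickB_step none with
  | none => none
  | some b => some b.2

-- ===== PRECONDITION & SPEC =====
-- Pre_ excludes association lists with duplicate keys: a Python dict cannot contain them,
-- so such lists do not encode any input the Python function can receive.
def Pre_pick_entity_field (row : List (String × String)) : Prop :=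
  (row.map Prod.fst).Nodup
instance (row : List (String × String)) : Decidable (Pre_pick_entity_field row) := by
  unfold Pre_pick_entity_field; infer_instance

def pvWitness_pick_entity_field : (List (String × String)) := [("title", "Alien"), ("year", "1979")]

def Spec_pick_entity_field (row : List (String × String)) (out : Option String) : Prop := out = pick_entity_field_alt row
instance (row : List (String × String)) (out : Option String) : Decidable (Spec_pick_entity_field row out) := by unfold Spec_pick_entity_field; infer_instance

-- ===== CLAIM (what is proved, stated in full; the proofs are below) =====
def Claim_equal_pick_entity_field : Prop := ∀ (row : List (String × String)), Dom_pick_entity_field row → Pre_pick_entity_field row → Spec_pick_entity_field row (pick_entity_field row)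

-- ===== LEMMAS AND PROOFS =====

-- 'k in row and isinstance(row[k], str) and row[k].strip()' as one predicate (proof-side)
def okKey (row : List (String × String)) (k : String) : Bool :=
  match row.find? (fun p => p.1 == k) with
  | some p => PySem.Str.strip p.2 != ""
  | none => false

-- the rank a valid row entry gets in B
def rkfun (p : Int × (String × String)) : Int :=
  pickB_rank.getD p.2.1 ((pickB_candidates.length : Int) + p.1)

-- B's min-selection as an argmin-style fold over the valid (rank, key) pairs
def argStep (a : Option (Int × String)) (b : Int × String) : Option (Int × String) :=
  match a with
  | none => some b
  | some a' => if b.1 < a'.1 then some b else some a'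

def minFold (a : Option (Int × String)) (g : List (Int × String)) : Option (Int × String) :=
  g.foldl argStep a

def gList (row : List (String × String)) : List (Int × String) :=
  ((PySem.List.enumerate row).filter (fun p => PySem.Str.strip p.2.2 != "")).map
    (fun p => (rkfun p, p.2.1))

-- ---- A-side: A is find-first of okKey over candidates ++ row keys ----

theorem pickA_loop_eq (row : List (String × String)) (ks : List String) :
    pickA_loop row ks =
      match ks.find? (okKey row) with
      | some k => some k
      | none => pickA_fallback row := by
  induction ks with
  | nil => simp [pickA_loop]
  | cons k rest ih =>
    simp only [pickA_loop, List.find?_cons, okKey]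
    cases h : row.find? (fun p => p.1 == k) with
    | none => simpa using ih
    | some p =>
      by_cases hs : PySem.Str.strip p.2 != "" <;> simp [hs, ih]

theorem find?_of_nodup (pre : List (String × String)) (k : String) (v : String)
    (rest : List (String × String))
    (hnd : ((pre ++ (k, v) :: rest).map Prod.fst).Nodup) :
    (pre ++ (k, v) :: rest).find? (fun p => p.1 == k) = some (k, v) := by
  rw [List.find?_append]
  have hpre : pre.find? (fun p => p.1 == k) = none := by
    rw [List.find?_eq_none]
    intro p hp
    simp only [List.map_append, List.map_cons, List.nodup_append] at hnd
    have hne : p.1 ≠ k :=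
      hnd.2.2 p.1 (List.mem_map_of_mem hp) k (List.mem_cons_self ..)
    simp [hne]
  simp [hpre]

theorem pickA_fallback_eq (row : List (String × String))
    (hnd : (row.map Prod.fst).Nodup) :
    ∀ pre rest, row = pre ++ rest →
      pickA_fallback rest = (rest.map Prod.fst).find? (okKey row) := by
  intro pre rest
  induction rest generalizing pre with
  | nil => intro _; simp [pickA_fallback]
  | cons p rest' ih =>
    obtain ⟨k, v⟩ := p
    intro hrow
    have hfind : row.find? (fun q => q.1 == k) = some (k, v) := by
      subst hrow; exact find?_of_nodup pre k v rest' hnd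
    have hok : okKey row k = (PySem.Str.strip v != "") := by
      simp [okKey, hfind]
    simp only [pickA_fallback, List.map_cons, List.find?_cons, hok]
    by_cases hs : PySem.Str.strip v != ""
    · simp [hs]
    · simp only [Bool.not_eq_true] at hs
      simp only [hs, Bool.false_eq_true, if_false]
      exact ih (pre ++ [(k, v)]) (by simpa using hrow)

theorem A_eq_find? (row : List (String × String)) (hnd : (row.map Prod.fst).Nodup) :
    pick_entity_field row = (pickA_candidates ++ row.map Prod.fst).find? (okKey row) := by
  unfold pick_entity_field
  rw [pickA_loop_eq, List.find?_append]
  have hfb := pickA_fallback_eq row hnd [] row rfl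
  cases h : pickA_candidates.find? (okKey row) with
  | some k => simp
  | none => simp [hfb]

-- ---- B-side: the fold is minFold over gList ----

theorem fold_eq_minFold (l : List (Int × (String × String))) (a : Option (Int × String)) :
    l.foldl pickB_step a =
      minFold a ((l.filter (fun p => PySem.Str.strip p.2.2 != "")).map
        (fun p => (rkfun p, p.2.1))) := by
  induction l generalizing a with
  | nil => simp [minFold]
  | cons p l ih =>
    have hstep : pickB_step a p =
        if PySem.Str.strip p.2.2 != "" then argStep a (rkfun p, p.2.1) else a := by
      cases a <;> simp [pickB_step, argStep, rkfun]
    by_cases hc : PySem.Str.strip p.2.2 != ""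
    · rw [List.foldl_cons, hstep, if_pos hc, ih, List.filter_cons_of_pos (by exact hc),
        List.map_cons]
      simp [minFold]
    · rw [List.foldl_cons, hstep, if_neg (by simp [hc]), ih,
        List.filter_cons_of_neg (by simp [hc])]

theorem B_eq_minFold (row : List (String × String)) :
    pick_entity_field_alt row =
      match minFold none (gList row) with
      | none => none
      | some b => some b.2 := by
  unfold pick_entity_field_alt gList
  rw [fold_eq_minFold]

-- minFold from a seed returns the first element of minimal rank among seed :: list
theorem minFold_some (g : List (Int × String)) :
    ∀ a : Int × String, ∃ b, minFold (some a) g = some b ∧ b ∈ a :: g ∧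
      ∀ q ∈ a :: g, b.1 ≤ q.1 := by
  induction g with
  | nil => intro a; exact ⟨a, rfl, by simp, by simp⟩
  | cons q g ih =>
    intro a
    by_cases hq : q.1 < a.1
    · obtain ⟨b, hb, hbm, hmin⟩ := ih q
      refine ⟨b, ?_, ?_, ?_⟩
      · simpa [minFold, argStep, hq] using hb
      · exact List.mem_cons_of_mem a hbm
      · intro r hr
        rcases List.mem_cons.mp hr with rfl | hr
        · exact le_of_lt (lt_of_le_of_lt (hmin q (List.mem_cons_self ..)) hq)
        · exact hmin r hr
    · obtain ⟨b, hb, hbm, hmin⟩ := ih a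
      refine ⟨b, ?_, ?_, ?_⟩
      · simpa [minFold, argStep, hq] using hb
      · rcases List.mem_cons.mp hbm with rfl | h
        · exact List.mem_cons_self ..
        · exact List.mem_cons_of_mem _ (List.mem_cons_of_mem _ h)
      · intro r hr
        rcases List.mem_cons.mp hr with rfl | hr
        · exact hmin r (List.mem_cons_self ..)
        · rcases List.mem_cons.mp hr with rfl | hr
          · exact le_trans (hmin a (List.mem_cons_self ..)) (not_lt.mp hq)
          · exact hmin r (List.mem_cons_of_mem _ hr)

-- ---- ranks are first-occurrence positions in candidates ++ row keys ----

theorem rank_getD_mem (k : String) (d : Int) (hk : k ∈ pickB_candidates) :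
    pickB_rank.getD k d = ((pickB_candidates.idxOf k : Nat) : Int) := by
  have hget : pickB_rank.get? k = some ((pickB_candidates.idxOf k : Nat) : Int) := by
    fin_cases hk <;> decide
  rw [PySem.Dict.getD_eq_get?_getD, hget, Option.getD_some]

theorem rank_getD_notMem (k : String) (d : Int) (hk : k ∉ pickB_candidates) :
    pickB_rank.getD k d = d := by
  rw [PySem.Dict.getD_eq_get?_getD]
  have hkeys : pickB_rank.keys = pickB_candidates := by decide
  have : pickB_rank.get? k = none := by
    rw [PySem.Dict.get?_eq_none_iff_not_mem_keys, hkeys]; exact hk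
  simp [this]

theorem rk_eq_idxOf (row : List (String × String)) (hnd : (row.map Prod.fst).Nodup)
    (i : Nat) (hi : i < row.length) :
    rkfun ((0 + (i : Int), row[i])) =
      (((pickA_candidates ++ row.map Prod.fst).idxOf (row[i]).1 : Nat) : Int) := by
  have hcands : pickA_candidates = pickB_candidates := rfl
  set k := (row[i]).1 with hk
  by_cases hkc : k ∈ pickB_candidates
  · rw [show rkfun ((0 + (i : Int), row[i])) = pickB_rank.getD k _ from rfl,
      rank_getD_mem k _ hkc, hcands, List.idxOf_append_of_mem hkc]
  · have hi' : i < (row.map Prod.fst).length := by simpa using hi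
    have hkm : (row.map Prod.fst)[i]'hi' = k := by simp [hk]
    have hidx : (row.map Prod.fst).idxOf k = i := by
      rw [← hkm]; exact hnd.idxOf_getElem i hi'
    rw [show rkfun ((0 + (i : Int), row[i])) = pickB_rank.getD k ((pickB_candidates.length : Int) + (0 + (i : Int))) from rfl,
      rank_getD_notMem k _ hkc, hcands, List.idxOf_append_of_notMem hkc, hidx]
    push_cast
    ring

-- ---- validity bridges ----

theorem okKey_of_mem (row : List (String × String)) (hnd : (row.map Prod.fst).Nodup)
    (k v : String) (hm : (k, v) ∈ row) (hs : PySem.Str.strip v != "") :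
    okKey row k = true := by
  obtain ⟨s, t, hst⟩ := List.append_of_mem hm
  have := find?_of_nodup s k v t (by rw [← hst]; exact hnd)
  rw [← hst] at this
  simp [okKey, this, hs]

theorem okKey_valid (row : List (String × String)) (k : String) (hok : okKey row k = true) :
    ∃ v, (k, v) ∈ row ∧ PySem.Str.strip v != "" := by
  unfold okKey at hok
  cases hfind : row.find? (fun p => p.1 == k) with
  | none => rw [hfind] at hok; simp at hok
  | some p =>
    rw [hfind] at hok
    have hmem := List.mem_of_find?_eq_some hfind
    have hkey : p.1 = k := by simpa using List.find?_some hfind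
    exact ⟨p.2, by rw [← hkey]; exact hmem, hok⟩

-- every valid key yields its gList element, whose rank is its idxOf position
theorem gList_of_valid (row : List (String × String)) (hnd : (row.map Prod.fst).Nodup)
    (k v : String) (hm : (k, v) ∈ row) (hs : PySem.Str.strip v != "") :
    ∃ b ∈ gList row, b.2 = k ∧
      b.1 = (((pickA_candidates ++ row.map Prod.fst).idxOf k : Nat) : Int) := by
  obtain ⟨i, hi, hrow⟩ := List.getElem_of_mem hm
  refine ⟨(rkfun ((0 + (i : Int), row[i])), k), ?_, rfl, ?_⟩
  · unfold gList
    refine List.mem_map.mpr ⟨(0 + (i : Int), row[i]), List.mem_filter.mpr ⟨?_, ?_⟩, ?_⟩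
    · exact (PySem.List.mem_enumerate_iff _ _ _).mpr ⟨i, hi, rfl⟩
    · simp [hrow, hs]
    · simp [hrow]
  · rw [rk_eq_idxOf row hnd i hi, hrow]

-- conversely every gList element is a valid key
theorem valid_of_gList (row : List (String × String)) (hnd : (row.map Prod.fst).Nodup)
    (b : Int × String) (hb : b ∈ gList row) :
    okKey row b.2 = true ∧ b.2 ∈ row.map Prod.fst ∧
      b.1 = (((pickA_candidates ++ row.map Prod.fst).idxOf b.2 : Nat) : Int) := by
  unfold gList at hb
  obtain ⟨p, hpf, hpb⟩ := List.mem_map.mp hb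
  obtain ⟨hpe, hps⟩ := List.mem_filter.mp hpf
  obtain ⟨i, hi, hpi⟩ := (PySem.List.mem_enumerate_iff _ _ _).mp hpe
  subst hpi
  refine ⟨?_, ?_, ?_⟩
  · rw [← hpb]
    exact okKey_of_mem row hnd (row[i]).1 (row[i]).2 (by simp) (by simpa using hps)
  · rw [← hpb]; exact List.mem_map_of_mem (by simp)
  · rw [← hpb]
    simpa using rk_eq_idxOf row hnd i hi

-- ===== VERDICT (by name: the statement is the Claim_ definition above) =====
theorem pick_entity_field_spec : Claim_equal_pick_entity_field := by
  intro row _hdom hpre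
  unfold Spec_pick_entity_field
  rw [A_eq_find? row hpre, B_eq_minFold row]
  set L := pickA_candidates ++ row.map Prod.fst with hL
  cases hg : gList row with
  | nil =>
    simp only [minFold, List.foldl_nil]
    rw [List.find?_eq_none]
    intro k hk
    simp only [Bool.not_eq_true]
    by_contra hok
    simp only [Bool.not_eq_false] at hok
    obtain ⟨v, hm, hs⟩ := okKey_valid row k hok
    obtain ⟨b, hbmem, _⟩ := gList_of_valid row hpre k v hm hs
    rw [hg] at hbmem
    exact absurd hbmem (List.not_mem_nil)
  | cons b0 g' =>
    have : minFold none (b0 :: g') = minFold (some b0) g' := rfl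
    rw [this]
    obtain ⟨b, hb, hbm, hmin⟩ := minFold_some g' b0
    rw [hb]
    have hbg : b ∈ gList row := by rw [hg]; exact hbm
    obtain ⟨hokb, hbkeys, hbrank⟩ := valid_of_gList row hpre b hbg
    have hbL : b.2 ∈ L := List.mem_append_right _ hbkeys
    cases hf : L.find? (okKey row) with
    | none =>
      rw [List.find?_eq_none] at hf
      exact absurd hokb (by simpa using hf b.2 hbL)
    | some k =>
      rw [List.find?_eq_some_iff_append] at hf
      obtain ⟨hok, l1, l2, hLd, hl1⟩ := hf
      obtain ⟨v, hm, hs⟩ := okKey_valid row k hok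
      obtain ⟨bk, hbk, hbk2, hbk1⟩ := gList_of_valid row hpre k v hm hs
      have hminbk : b.1 ≤ bk.1 := by
        rw [hg] at hbk; exact hmin bk hbk
      have hknl1 : k ∉ l1 := fun hkl => by simpa [hok] using hl1 k hkl
      have hbnl1 : b.2 ∉ l1 := fun hkl => by simpa [hokb] using hl1 b.2 hkl
      have hidxk : L.idxOf k = l1.length := by
        rw [hLd, List.idxOf_append_of_notMem hknl1, List.idxOf_cons_self]
        omega
      have hidxb : L.idxOf b.2 = l1.length + (k :: l2).idxOf b.2 := by
        rw [hLd, List.idxOf_append_of_notMem hbnl1]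
      have hle : L.idxOf b.2 ≤ L.idxOf k := by
        rw [← hL] at hbrank hbk1
        have := hminbk
        rw [hbrank, hbk1] at this
        exact_mod_cast this
      have hzero : (k :: l2).idxOf b.2 = 0 := by omega
      by_cases hkb : k = b.2
      · rw [hkb]
      · rw [List.idxOf_cons] at hzero
        simp only [Bool.cond_eq_ite, beq_iff_eq] at hzero
        rw [if_neg hkb] at hzero
        omega
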